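-- pv_equiv track=rewrite | github.com/LucyIvatt/Advent-of-Code-22 | python/year_2022/day_15_beacon_exclusion_zone/solution.py | clear_area
-- ===== SOURCE A (Python) =====
-- def clear_area(sensor, distance, Y_indices, bound, p1=True):
--     """Clears the area around the sensor."""
--     x, y = sensor
--     i = 0
--     y_coords = [y]
--
--     # if the sensor will not affect the y coordinate thats being checked in part 1 - skip
--     if p1 and bound not in range(y-distance, y+distance+1):
--         return Y_indices
--
--     # if the sensor will not affect the y coordinates that are being checked in part 2 - skip
--     if not p1 and (y-distance <= 0) and (y+distance+1 >= bound):
--         return Y_indices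
--
--     for i in range(distance):
--         start, end = x-distance+i, x+distance-i
--         for cy in y_coords:
--             # Only updates the y coordinate being checked in part 1
--             if p1 and cy == bound:
--                 Y_indices[bound].append((start, end))
--             elif not p1:
--                 # Clamps the start and end values to between 0 and 4,000,000 if out of range
--                 if start < 0:
--                     start = 0
--                 elif end > bound:
--                     end = bound
--
--                 # Updates the interval dictionary if the y coordinate is within the range
--                 if 0 <= cy <= bound:
--                     Y_indices[cy].append((start, end))
--
--         # Updates the y coordinate after each loop
--         if len(y_coords) == 1:
--             y_coords = [y+1, y-1]
--         else:
--             y_coords = [y_coords[0]+1, y_coords[1]-1]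
--
--     return Y_indices
-- ===== SOURCE B (Python) =====
-- def clear_area(sensor, distance, Y_indices, bound, p1=True):
--     """Clears the area around the sensor (direct per-row computation)."""
--     x, y = sensor
--     if p1:
--         if distance >= 0 and y - distance <= bound <= y + distance:
--             off = abs(bound - y)
--             if off < distance:
--                 Y_indices[bound].append((x - distance + off, x + distance - off))
--         return Y_indices
--     if y - distance <= 0 and y + distance + 1 >= bound:
--         return Y_indices
--     lo = max(0, y - distance + 1)
--     hi = min(bound, y + distance - 1)
--     for cy in range(lo, hi + 1):
--         off = abs(cy - y)
--         Y_indices[cy].append((max(x - distance + off, 0), min(x + distance - off, bound)))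
--     return Y_indices
-- ===== Notes on version B (the rewrite author's own statement) =====
-- stated objective: alternative
-- what changed: A walks offsets i=0..distance-1 keeping a mutable y_coords pair and mutable start/end variables shared between the two rows of each iteration; B computes the single affected row directly for part 1 and, for part 2, makes one ascending pass over only the rows inside [0, bound], deriving each interval from the row's offset and clamping both ends (intended as faster — O(1) part 1 vs O(distance) — but a timing run measured only 1.27x at the largest size, so no speed is claimed).
-- intended difference: On part-2 calls where some covered row at or above the sensor's row has its interval sticking out past both ends (start < 0 and end > bound), A's elif-clamp plus the start/end variables leaking between the two rows of an iteration append an interval with an unclamped end (0, end) with end > bound to those rows, while B appends the fully clamped (0, bound), which is what the code's own clamping comment intends. — e.g. on clear_area((2, 4), 3, [(2, []), (3, []), (4, [])], 4, false): A returns [(2, [(1, 3)]), (3, [(0, 4)]), (4, [(0, 5)])], B returns [(2, [(1, 3)]), (3, [(0, 4)]), (4, [(0, 4)])]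
import Mathlib
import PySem

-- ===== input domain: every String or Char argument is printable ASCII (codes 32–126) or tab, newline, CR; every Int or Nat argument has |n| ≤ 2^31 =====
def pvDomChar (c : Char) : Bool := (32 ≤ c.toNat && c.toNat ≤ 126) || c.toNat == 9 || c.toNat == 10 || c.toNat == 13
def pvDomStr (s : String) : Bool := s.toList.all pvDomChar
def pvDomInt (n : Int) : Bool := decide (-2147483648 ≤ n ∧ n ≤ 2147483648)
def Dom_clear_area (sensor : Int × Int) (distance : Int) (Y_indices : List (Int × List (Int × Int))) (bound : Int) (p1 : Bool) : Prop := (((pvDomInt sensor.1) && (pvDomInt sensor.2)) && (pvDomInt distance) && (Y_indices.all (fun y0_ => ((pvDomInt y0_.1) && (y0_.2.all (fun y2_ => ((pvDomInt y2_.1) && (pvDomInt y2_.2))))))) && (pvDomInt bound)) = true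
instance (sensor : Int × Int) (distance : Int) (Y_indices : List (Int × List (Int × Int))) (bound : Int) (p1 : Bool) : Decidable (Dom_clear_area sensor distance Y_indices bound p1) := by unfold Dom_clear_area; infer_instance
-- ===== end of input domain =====

-- B replaces A's offset loop (with its per-iteration two-row scan and mutable start/end
-- state) by a direct per-row computation: the single affected row for part 1, one ascending
-- pass over only the rows inside [0, bound] for part 2, clamping BOTH interval ends.
-- Both Pythons mutate the Y_indices dict in place and return it; the equivalence proved here
-- is about the RETURN value (the mutation produces exactly that value in both).

-- ===== PORT A =====
-- shared helper: `Y[k].append(t)` on the association list; exact where the key is present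
-- (Python raises KeyError on a missing key — those inputs are excluded by Pre_clear_area)
def dAppend (l : List (Int × List (Int × Int))) (k : Int) (t : Int × Int) : List (Int × List (Int × Int)) :=
  match l with
  | [] => []
  | (k', v) :: rest => if k' = k then (k', v ++ [t]) :: rest else (k', v) :: dAppend rest k t

-- A-side helper: the body of A's `for i in range(distance)` loop; the state is
-- (Y_indices, y_coords) and the inner fold threads Python's mutable (start, end) pair.
def aStep (x y distance bound : Int) (p1 : Bool)
    (st : List (Int × List (Int × Int)) × List Int) (i : Int) :
    List (Int × List (Int × Int)) × List Int :=
  let start := x - distance + i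
  let «end» := x + distance - i
  let res := st.2.foldl
    (fun (p : List (Int × List (Int × Int)) × Int × Int) cy =>
      if p1 = true ∧ cy = bound then (dAppend p.1 bound (p.2.1, p.2.2), p.2.1, p.2.2)
      else if p1 = false then
        let s' := if p.2.1 < 0 then 0 else p.2.1
        let e' := if p.2.1 < 0 then p.2.2 else if p.2.2 > bound then bound else p.2.2
        if 0 ≤ cy ∧ cy ≤ bound then (dAppend p.1 cy (s', e'), s', e') else (p.1, s', e')
      else p)
    (st.1, start, «end»)
  -- `y_coords` update; the `.getD 0` defaults are unreachable (the list has length 2 there)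
  let ycs := if st.2.length = 1 then [y + 1, y - 1]
             else [(PySem.List.pyGet? st.2 0).getD 0 + 1, (PySem.List.pyGet? st.2 1).getD 0 - 1]
  (res.1, ycs)

def clear_area (sensor : Int × Int) (distance : Int) (Y_indices : List (Int × List (Int × Int))) (bound : Int) (p1 : Bool) : List (Int × List (Int × Int)) :=
  let x := sensor.1
  let y := sensor.2
  -- `bound not in range(y-distance, y+distance+1)`
  if p1 = true ∧ ¬(y - distance ≤ bound ∧ bound ≤ y + distance) then Y_indices
  else if p1 = false ∧ y - distance ≤ 0 ∧ y + distance + 1 ≥ bound then Y_indices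
  else ((PySem.List.pyRange 0 distance 1).foldl (aStep x y distance bound p1) (Y_indices, [y])).1

-- ===== PORT B =====
def clear_area_alt (sensor : Int × Int) (distance : Int) (Y_indices : List (Int × List (Int × Int))) (bound : Int) (p1 : Bool) : List (Int × List (Int × Int)) :=
  let x := sensor.1
  let y := sensor.2
  if p1 = true then
    if 0 ≤ distance ∧ y - distance ≤ bound ∧ bound ≤ y + distance then
      let off := |bound - y|
      if off < distance then dAppend Y_indices bound (x - distance + off, x + distance - off)
      else Y_indices
    else Y_indices
  else if y - distance ≤ 0 ∧ y + distance + 1 ≥ bound then Y_indices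
  else
    let lo := max 0 (y - distance + 1)
    let hi := min bound (y + distance - 1)
    (PySem.List.pyRange lo (hi + 1) 1).foldl
      (fun Y cy =>
        let off := |cy - y|
        dAppend Y cy (max (x - distance + off) 0, min (x + distance - off) bound)) Y_indices

-- ===== PRECONDITION & SPEC =====
-- Pre_ excludes exactly the inputs where the Python raises KeyError: a row to which an
-- interval is appended is missing from the dict (both A and B raise on exactly these).
def Pre_clear_area (sensor : Int × Int) (distance : Int) (Y_indices : List (Int × List (Int × Int))) (bound : Int) (p1 : Bool) : Prop :=
  (p1 = true → (sensor.2 - distance < bound ∧ bound < sensor.2 + distance) →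
    bound ∈ Y_indices.map (·.1)) ∧
  (p1 = false → ¬(sensor.2 - distance ≤ 0 ∧ sensor.2 + distance + 1 ≥ bound) →
    ∀ cy ∈ PySem.List.pyRange (max 0 (sensor.2 - distance + 1)) (min bound (sensor.2 + distance - 1) + 1) 1,
      cy ∈ Y_indices.map (·.1))
instance (sensor : Int × Int) (distance : Int) (Y_indices : List (Int × List (Int × Int))) (bound : Int) (p1 : Bool) : Decidable (Pre_clear_area sensor distance Y_indices bound p1) := by unfold Pre_clear_area; infer_instance

def pvWitness_clear_area : (Int × Int) × Int × (List (Int × List (Int × Int))) × Int × Bool :=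
  ((0, 0), 0, [], 0, true)

-- On part-2 calls where some covered row at or above the sensor's row has its interval
-- sticking out past BOTH ends (start < 0 and end > bound), A's elif-clamp together with the
-- start/end variables leaking from row y+i to row y-i appends an interval with an unclamped
-- end, (0, end) with end > bound, to those rows, while B appends the fully clamped (0, bound),
-- which is what the code's own comment ("clamps the start and end values") intends.
def D_clear_area (sensor : Int × Int) (distance : Int) (Y_indices : List (Int × List (Int × Int))) (bound : Int) (p1 : Bool) : Prop :=
  p1 = false ∧ ¬(sensor.2 - distance ≤ 0 ∧ sensor.2 + distance + 1 ≥ bound) ∧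
    1 ≤ distance ∧ 0 ≤ bound ∧ 1 - distance ≤ sensor.2 ∧ sensor.2 ≤ bound ∧
    sensor.1 - distance + max 0 (-sensor.2) < 0 ∧ sensor.1 + distance - max 0 (-sensor.2) > bound
instance (sensor : Int × Int) (distance : Int) (Y_indices : List (Int × List (Int × Int))) (bound : Int) (p1 : Bool) : Decidable (D_clear_area sensor distance Y_indices bound p1) := by unfold D_clear_area; infer_instance

def Spec_clear_area (sensor : Int × Int) (distance : Int) (Y_indices : List (Int × List (Int × Int))) (bound : Int) (p1 : Bool) (out : List (Int × List (Int × Int))) : Prop := ¬ D_clear_area sensor distance Y_indices bound p1 → out = clear_area_alt sensor distance Y_indices bound p1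
instance (sensor : Int × Int) (distance : Int) (Y_indices : List (Int × List (Int × Int))) (bound : Int) (p1 : Bool) (out : List (Int × List (Int × Int))) : Decidable (Spec_clear_area sensor distance Y_indices bound p1 out) := by unfold Spec_clear_area; infer_instance

def pvDiffWitness_clear_area : (Int × Int) × Int × (List (Int × List (Int × Int))) × Int × Bool :=
  ((2, 4), 3, [(2, []), (3, []), (4, [])], 4, false)
def pvDiffWitnessOut_clear_area : (List (Int × List (Int × Int))) × (List (Int × List (Int × Int))) :=
  ([(2, [(1, 3)]), (3, [(0, 4)]), (4, [(0, 5)])], [(2, [(1, 3)]), (3, [(0, 4)]), (4, [(0, 4)])])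

-- ===== CLAIM (what is proved, stated in full; the proofs are below) =====
def Claim_unchanged_clear_area : Prop := ∀ (sensor : Int × Int) (distance : Int) (Y_indices : List (Int × List (Int × Int))) (bound : Int) (p1 : Bool), Dom_clear_area sensor distance Y_indices bound p1 → Pre_clear_area sensor distance Y_indices bound p1 → Spec_clear_area sensor distance Y_indices bound p1 (clear_area sensor distance Y_indices bound p1)
def Claim_changed_clear_area : Prop := Dom_clear_area (pvDiffWitness_clear_area.1) (pvDiffWitness_clear_area.2.1) (pvDiffWitness_clear_area.2.2.1) (pvDiffWitness_clear_area.2.2.2.1) (pvDiffWitness_clear_area.2.2.2.2) ∧ Pre_clear_area (pvDiffWitness_clear_area.1) (pvDiffWitness_clear_area.2.1) (pvDiffWitness_clear_area.2.2.1) (pvDiffWitness_clear_area.2.2.2.1) (pvDiffWitness_clear_area.2.2.2.2) ∧ D_clear_area (pvDiffWitness_clear_area.1) (pvDiffWitness_clear_area.2.1) (pvDiffWitness_clear_area.2.2.1) (pvDiffWitness_clear_area.2.2.2.1) (pvDiffWitness_clear_area.2.2.2.2) ∧ clear_area (pvDiffWitness_clear_area.1) (pvDiffWitness_clear_area.2.1)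 (pvDiffWitness_clear_area.2.2.1) (pvDiffWitness_clear_area.2.2.2.1) (pvDiffWitness_clear_area.2.2.2.2) = pvDiffWitnessOut_clear_area.1 ∧ clear_area_alt (pvDiffWitness_clear_area.1) (pvDiffWitness_clear_area.2.1) (pvDiffWitness_clear_area.2.2.1) (pvDiffWitness_clear_area.2.2.2.1) (pvDiffWitness_clear_area.2.2.2.2) = pvDiffWitnessOut_clear_area.2 ∧ pvDiffWitnessOut_clear_area.1 ≠ pvDiffWitnessOut_clear_area.2
def Claim_exact_clear_area : Prop := ∀ (sensor : Int × Int) (distance : Int) (Y_indices : List (Int × List (Int × Int))) (bound : Int) (p1 : Bool), Dom_clear_area sensor distance Y_indices bound p1 → Pre_clear_area sensor distance Y_indices bound p1 → D_clear_area sensor distance Y_indices bound p1 → clear_area sensor distance Y_indices bound p1 ≠ clear_area_alt sensor distance Y_indices bound p1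

-- ===== LEMMAS AND PROOFS =====

-- A's per-row interval: rows at or above the sensor's row get Python's elif-clamp, rows
-- below it (processed second in a pair, after start/end were mutated) get the full clamp.
def rowIvA (x y d bound cy : Int) : Int × Int :=
  let s := x - d + |cy - y|
  let e := x + d - |cy - y|
  if y ≤ cy then (if s < 0 then (0, e) else if e > bound then (s, bound) else (s, e))
  else (if s < 0 then 0 else s, if e > bound then bound else e)

-- B's per-row interval: full clamp on both ends.
def rowIvB (x y d bound cy : Int) : Int × Int :=
  (max (x - d + |cy - y|) 0, min (x + d - |cy - y|) bound)

-- the row-indexed update A's loop performs (for either part)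
def stepG (x y d bound : Int) (p1 : Bool) (Y : List (Int × List (Int × Int))) (cy : Int) :
    List (Int × List (Int × Int)) :=
  match p1 with
  | true => if cy = bound then dAppend Y bound (x - d + |cy - y|, x + d - |cy - y|) else Y
  | false => if 0 ≤ cy ∧ cy ≤ bound then dAppend Y cy (rowIvA x y d bound cy) else Y

theorem dAppend_comm (l : List (Int × List (Int × Int))) (a b : Int) (t u : Int × Int)
    (h : a ≠ b) : dAppend (dAppend l a t) b u = dAppend (dAppend l b u) a t := by
  induction l with
  | nil => rfl
  | cons hd tl ih =>
    obtain ⟨k, v⟩ := hd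
    by_cases hka : k = a <;> by_cases hkb : k = b
    · exact absurd (hka ▸ hkb.symm ▸ rfl) h
    · subst hka; simp [dAppend, hkb, h, Ne.symm h]
    · subst hkb; simp [dAppend, hka, h, Ne.symm h]
    · simp [dAppend, hka, hkb, ih]

theorem stepG_comm (x y d bound : Int) (p1 : Bool)
    (Y : List (Int × List (Int × Int))) (a b : Int) :
    stepG x y d bound p1 (stepG x y d bound p1 Y a) b
      = stepG x y d bound p1 (stepG x y d bound p1 Y b) a := by
  by_cases hab : a = b
  · subst hab; rfl
  · cases p1 <;> simp only [stepG] <;>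
      split_ifs <;> first
        | rfl
        | (exact dAppend_comm _ _ _ _ _ hab)
        | omega

theorem foldl_stepG_pull (x y d bound : Int) (p1 : Bool) (l : List Int)
    (Y : List (Int × List (Int × Int))) (c : Int) :
    l.foldl (stepG x y d bound p1) (stepG x y d bound p1 Y c)
      = stepG x y d bound p1 (l.foldl (stepG x y d bound p1) Y) c := by
  induction l generalizing Y with
  | nil => rfl
  | cons hd tl ih => simp only [List.foldl_cons, stepG_comm _ _ _ _ _ _ c hd, ih]

-- the multiset of rows A touches, reordered into one ascending contiguous range
theorem stepG_reorder (x y d bound : Int) (p1 : Bool) : ∀ (n : Nat) (Y : List (Int × List (Int × Int))),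
    ((PySem.List.pyRange 1 ((n : Int) + 1) 1).flatMap (fun i => [y + i, y - i])).foldl
        (stepG x y d bound p1) (stepG x y d bound p1 Y y)
      = (PySem.List.pyRange (y - n) (y + n + 1) 1).foldl (stepG x y d bound p1) Y := by
  intro n
  induction n with
  | zero =>
    intro Y
    simp [PySem.List.pyRange_one_eq_nil, PySem.List.pyRange_one_singleton]
  | succ n ih =>
    intro Y
    have e1 : ((n + 1 : Nat) : Int) = (n : Int) + 1 := by push_cast; ring
    rw [e1]
    rw [PySem.List.pyRange_one_succ_right (show (1:Int) ≤ (n : Int) + 1 by omega), List.flatMap_append]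
    have e2 : y - ((n : Int) + 1) = y - (n : Int) - 1 := by ring
    have e3 : y + ((n : Int) + 1) + 1 = (y + (n : Int) + 1) + 1 := by ring
    have e5 : y + ((n : Int) + 1) = y + (n : Int) + 1 := by ring
    rw [e2, e3, PySem.List.pyRange_one_cons (show y - (n : Int) - 1 < (y + (n : Int) + 1) + 1 by omega)]
    have e4 : y - (n : Int) - 1 + 1 = y - (n : Int) := by ring
    rw [e4, PySem.List.pyRange_one_succ_right (show y - (n : Int) ≤ y + (n : Int) + 1 by omega)]
    simp only [List.flatMap_cons, List.flatMap_nil, List.append_nil, List.foldl_append,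
      List.foldl_cons, List.foldl_nil]
    rw [e5, e2, ih Y, foldl_stepG_pull]
    exact stepG_comm x y d bound p1 _ (y + (n : Int) + 1) (y - (n : Int) - 1)


theorem aStep_first (x y d bound : Int) (p1 : Bool) (Y : List (Int × List (Int × Int))) :
    aStep x y d bound p1 (Y, [y]) 0 = (stepG x y d bound p1 Y y, [y + 1, y - 1]) := by
  cases p1
  · simp only [aStep, stepG, rowIvA, List.foldl_cons, List.foldl_nil]
    norm_num
    split_ifs <;> simp_all
  · simp only [aStep, stepG, rowIvA, List.foldl_cons, List.foldl_nil]
    norm_num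
    split_ifs <;> simp_all

theorem aStep_two (x y d bound : Int) (p1 : Bool) (Y : List (Int × List (Int × Int)))
    (j : Int) (hj : 1 ≤ j) :
    aStep x y d bound p1 (Y, [y + j, y - j]) j
      = (stepG x y d bound p1 (stepG x y d bound p1 Y (y + j)) (y - j), [y + j + 1, y - j - 1]) := by
  have h1 : y + j - y = j := by ring
  have h2 : y - j - y = -j := by ring
  have h3 : |j| = j := abs_of_nonneg (by omega)
  have h4 : ¬(y ≤ y - j) := by omega
  have hycs : (aStep x y d bound p1 (Y, [y + j, y - j]) j).2 = [y + j + 1, y - j - 1] := by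
    simp [aStep, PySem.List.pyGet?, PySem.List.pyIdx?]
  have hdict : (aStep x y d bound p1 (Y, [y + j, y - j]) j).1
      = stepG x y d bound p1 (stepG x y d bound p1 Y (y + j)) (y - j) := by
    cases p1
    · by_cases hs : x - d + j < 0 <;> by_cases he : x + d - j > bound <;>
        by_cases hb1 : 0 ≤ y + j ∧ y + j ≤ bound <;> by_cases hb2 : 0 ≤ y - j ∧ y - j ≤ bound <;>
        simp [aStep, stepG, rowIvA, h1, h2, h3, h4, abs_neg, hs, he, hb1, hb2] <;>
        (try (split_ifs <;> simp_all)) <;> omega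
    · by_cases hbb1 : y + j = bound <;> by_cases hbb2 : y - j = bound <;>
        simp [aStep, stepG, h1, h2, h3, abs_neg, hbb1, hbb2] <;>
        rw [show |bound - y| = j from by
          rcases abs_cases (bound - y) with ⟨ha, _⟩ | ⟨ha, _⟩ <;> omega]
  calc aStep x y d bound p1 (Y, [y + j, y - j]) j
      = ((aStep x y d bound p1 (Y, [y + j, y - j]) j).1,
         (aStep x y d bound p1 (Y, [y + j, y - j]) j).2) := rfl
    _ = _ := by rw [hdict, hycs]

theorem bridgeA (x y d bound : Int) (p1 : Bool) : ∀ (k : Nat) (j : Int)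
    (Y : List (Int × List (Int × Int))), 1 ≤ j → j + k = d →
    ((PySem.List.pyRange j d 1).foldl (aStep x y d bound p1) (Y, [y + j, y - j])).1
      = ((PySem.List.pyRange j d 1).flatMap (fun i => [y + i, y - i])).foldl
          (stepG x y d bound p1) Y := by
  intro k
  induction k with
  | zero =>
    intro j Y hj hd
    rw [show d = j by omega, PySem.List.pyRange_one_eq_nil le_rfl]
    rfl
  | succ k ih =>
    intro j Y hj hd
    rw [PySem.List.pyRange_one_cons (show j < d by omega)]
    simp only [List.foldl_cons, List.flatMap_cons]
    rw [aStep_two x y d bound p1 Y j hj,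
        show y + j + 1 = y + (j + 1) by ring, show y - j - 1 = y - (j + 1) by ring,
        ih (j + 1) _ (by omega) (by omega)]
    simp only [List.foldl_append, List.foldl_cons, List.foldl_nil]

theorem A_loop (x y d bound : Int) (p1 : Bool) (Y : List (Int × List (Int × Int)))
    (hd : 1 ≤ d) :
    ((PySem.List.pyRange 0 d 1).foldl (aStep x y d bound p1) (Y, [y])).1
      = (PySem.List.pyRange (y - d + 1) (y + d) 1).foldl (stepG x y d bound p1) Y := by
  rw [PySem.List.pyRange_one_cons (show (0:Int) < d by omega), List.foldl_cons, aStep_first]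
  have h0 : (0:Int) + 1 = 1 := by ring
  rw [h0, bridgeA x y d bound p1 (d - 1).toNat 1 _ le_rfl (by omega)]
  have hn : d = ((d - 1).toNat : Int) + 1 := by omega
  have e1 : PySem.List.pyRange 1 d = PySem.List.pyRange 1 (((d - 1).toNat : Int) + 1) := by rw [← hn]
  have e2 : y - d + 1 = y - ((d - 1).toNat : Int) := by omega
  have e3 : y + d = y + ((d - 1).toNat : Int) + 1 := by omega
  rw [e1, e2, e3]
  exact stepG_reorder x y d bound p1 (d - 1).toNat Y

theorem shrink (bound : Int) (iv : Int → Int × Int) : ∀ (k : Nat) (a b : Int)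
    (Y : List (Int × List (Int × Int))), (b - a).toNat = k →
    (PySem.List.pyRange a b 1).foldl
        (fun Y cy => if 0 ≤ cy ∧ cy ≤ bound then dAppend Y cy (iv cy) else Y) Y
      = (PySem.List.pyRange (max a 0) (min b (bound + 1)) 1).foldl
          (fun Y cy => dAppend Y cy (iv cy)) Y := by
  intro k
  induction k with
  | zero =>
    intro a b Y h
    rw [PySem.List.pyRange_one_eq_nil (show b ≤ a by omega),
        PySem.List.pyRange_one_eq_nil (show min b (bound + 1) ≤ max a 0 by omega)]
    rfl
  | succ k ih =>
    intro a b Y h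
    rw [PySem.List.pyRange_one_cons (show a < b by omega), List.foldl_cons]
    by_cases hin : 0 ≤ a ∧ a ≤ bound
    · rw [if_pos hin, show max a 0 = a by omega,
          PySem.List.pyRange_one_cons (show a < min b (bound + 1) by omega), List.foldl_cons,
          ih (a + 1) b _ (by omega), show max (a + 1) 0 = a + 1 by omega]
    · rw [if_neg hin, ih (a + 1) b Y (by omega)]
      by_cases ha : a < 0
      · rw [show max (a + 1) 0 = max a 0 by omega]
      · rw [PySem.List.pyRange_one_eq_nil (show min b (bound + 1) ≤ max (a + 1) 0 by omega),
            PySem.List.pyRange_one_eq_nil (show min b (bound + 1) ≤ max a 0 by omega)]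

theorem single (x y d bound : Int) : ∀ (k : Nat) (a b : Int)
    (Y : List (Int × List (Int × Int))), (b - a).toNat = k →
    (PySem.List.pyRange a b 1).foldl (stepG x y d bound true) Y
      = if a ≤ bound ∧ bound < b then
          dAppend Y bound (x - d + |bound - y|, x + d - |bound - y|)
        else Y := by
  intro k
  induction k with
  | zero =>
    intro a b Y h
    rw [PySem.List.pyRange_one_eq_nil (show b ≤ a by omega), if_neg (by omega)]
    rfl
  | succ k ih =>
    intro a b Y h
    rw [PySem.List.pyRange_one_cons (show a < b by omega), List.foldl_cons]
    by_cases hab : a = bound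
    · have hstep : stepG x y d bound true Y a
          = dAppend Y bound (x - d + |bound - y|, x + d - |bound - y|) := by
        subst hab; simp [stepG]
      rw [hstep, ih (a + 1) b _ (by omega), if_neg (by omega), if_pos (by omega)]
    · have hstep : stepG x y d bound true Y a = Y := by simp [stepG, hab]
      rw [hstep, ih (a + 1) b Y (by omega)]
      split_ifs <;> first | rfl | omega

theorem lookup_dAppend_self (l : List (Int × List (Int × Int))) (k : Int) (t : Int × Int) :
    List.lookup k (dAppend l k t) = (List.lookup k l).map (· ++ [t]) := by
  induction l with
  | nil => rfl
  | cons hd tl ih =>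
    obtain ⟨k', v⟩ := hd
    by_cases hk : k' = k
    · subst hk
      have hb : (k' == k') = true := beq_self_eq_true k'
      simp [dAppend, List.lookup, hb]
    · have hb : (k == k') = false := beq_eq_false_iff_ne.mpr (fun h => hk h.symm)
      simp [dAppend, List.lookup, hk, hb, ih]

theorem lookup_dAppend_ne (l : List (Int × List (Int × Int))) (k c : Int) (t : Int × Int)
    (h : c ≠ k) : List.lookup k (dAppend l c t) = List.lookup k l := by
  induction l with
  | nil => rfl
  | cons hd tl ih =>
    obtain ⟨k', v⟩ := hd
    by_cases hk : k' = c
    · subst hk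
      have hb : (k == k') = false := beq_eq_false_iff_ne.mpr (fun hh => h (hh.symm))
      simp [dAppend, List.lookup, hb]
    · by_cases hkk : k' = k
      · have hb : (k == k') = true := beq_iff_eq.mpr hkk.symm
        simp [dAppend, List.lookup, hk, hb]
      · have hb : (k == k') = false := beq_eq_false_iff_ne.mpr (fun hh => hkk hh.symm)
        simp [dAppend, List.lookup, hk, hb, ih]

theorem lookup_foldl (iv : Int → Int × Int) (k : Int) : ∀ (rows : List Int)
    (Y : List (Int × List (Int × Int))) (v : List (Int × Int)), List.lookup k Y = some v →
    List.lookup k (rows.foldl (fun Y cy => dAppend Y cy (iv cy)) Y)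
      = some (v ++ List.replicate (rows.count k) (iv k)) := by
  intro rows
  induction rows with
  | nil => intro Y v hv; simpa using hv
  | cons c rest ih =>
    intro Y v hv
    by_cases hc : c = k
    · subst hc
      have h1 : List.lookup c (dAppend Y c (iv c)) = some (v ++ [iv c]) := by
        rw [lookup_dAppend_self, hv]; rfl
      rw [List.foldl_cons, ih _ _ h1]
      simp only [List.count_cons, beq_self_eq_true, if_true, List.append_assoc]
      simp [List.replicate_succ]
    · rw [List.foldl_cons, ih _ v (by rw [lookup_dAppend_ne _ _ _ _ hc]; exact hv)]
      simp [List.count_cons, hc, Ne.symm hc]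

theorem lookup_of_mem_keys (l : List (Int × List (Int × Int))) (k : Int)
    (h : k ∈ l.map (·.1)) : ∃ v, List.lookup k l = some v := by
  induction l with
  | nil => simp at h
  | cons hd tl ih =>
    obtain ⟨k', v⟩ := hd
    by_cases hk : k' = k
    · exact ⟨v, by subst hk; simp [List.lookup, beq_self_eq_true]⟩
    · simp only [List.map_cons, List.mem_cons] at h
      rcases h with h | h
      · exact absurd h.symm hk
      · obtain ⟨w, hw⟩ := ih h
        exact ⟨w, by
          have hb : (k == k') = false := beq_eq_false_iff_ne.mpr (fun hh => hk hh.symm)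
          simp [List.lookup, hb, hw]⟩

theorem A_p2 (x y d bound : Int) (Y : List (Int × List (Int × Int)))
    (hskip : ¬(y - d ≤ 0 ∧ y + d + 1 ≥ bound)) (hd1 : 1 ≤ d) :
    clear_area (x, y) d Y bound false
      = (PySem.List.pyRange (max 0 (y - d + 1)) (min bound (y + d - 1) + 1) 1).foldl
          (fun Y cy => dAppend Y cy (rowIvA x y d bound cy)) Y := by
  simp only [clear_area]
  rw [if_neg (by simp), if_neg (by rintro ⟨_, h2, h3⟩; exact hskip ⟨h2, h3⟩), A_loop x y d bound false Y hd1]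
  have hfun : stepG x y d bound false
      = fun Y cy => if 0 ≤ cy ∧ cy ≤ bound then dAppend Y cy (rowIvA x y d bound cy) else Y := rfl
  rw [hfun, shrink bound (rowIvA x y d bound) ((y + d) - (y - d + 1)).toNat (y - d + 1) (y + d) Y rfl,
      show max (y - d + 1) 0 = max 0 (y - d + 1) by omega,
      show min (y + d) (bound + 1) = min bound (y + d - 1) + 1 by omega]

theorem B_p2 (x y d bound : Int) (Y : List (Int × List (Int × Int)))
    (hskip : ¬(y - d ≤ 0 ∧ y + d + 1 ≥ bound)) :
    clear_area_alt (x, y) d Y bound false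
      = (PySem.List.pyRange (max 0 (y - d + 1)) (min bound (y + d - 1) + 1) 1).foldl
          (fun Y cy => dAppend Y cy (rowIvB x y d bound cy)) Y := by
  simp only [clear_area_alt]
  rw [if_neg (by simp), if_neg hskip]
  rfl

theorem rowIv_agree (x y d bound : Int) (Y : List (Int × List (Int × Int)))
    (hskip : ¬(y - d ≤ 0 ∧ y + d + 1 ≥ bound))
    (hnD : ¬ D_clear_area (x, y) d Y bound false) (cy : Int)
    (hcy : max 0 (y - d + 1) ≤ cy ∧ cy < min bound (y + d - 1) + 1) :
    rowIvA x y d bound cy = rowIvB x y d bound cy := by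
  by_cases hy : y ≤ cy
  · have hocy : |cy - y| = cy - y := abs_of_nonneg (by omega)
    by_cases hs : x - d + (cy - y) < 0
    · by_cases he : x + d - (cy - y) > bound
      · exfalso
        apply hnD
        unfold D_clear_area
        exact ⟨rfl, hskip, by omega, by omega, by omega, by omega, by omega, by omega⟩
      · simp only [rowIvA, rowIvB, hocy]
        rw [if_pos hy, if_pos hs]
        simp [Prod.mk.injEq]
        omega
    · simp only [rowIvA, rowIvB, hocy]
      rw [if_pos hy, if_neg hs]
      split_ifs <;> simp [Prod.mk.injEq] <;> omega
  · have hocy : |cy - y| = y - cy := by rw [abs_of_nonpos (by omega)]; ring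
    simp only [rowIvA, rowIvB, hocy]
    rw [if_neg hy]
    split_ifs <;> simp [Prod.mk.injEq] <;> omega

-- ===== VERDICT (by name: the statement is the Claim_ definition above) =====
theorem clear_area_spec : Claim_unchanged_clear_area := by
  intro sensor d Y bound p1 _hdom hpre hnD
  obtain ⟨x, y⟩ := sensor
  cases p1 with
  | true =>
    by_cases hg : y - d ≤ bound ∧ bound ≤ y + d
    · by_cases hd1 : 1 ≤ d
      · rw [show clear_area (x, y) d Y bound true
              = ((PySem.List.pyRange 0 d 1).foldl (aStep x y d bound true) (Y, [y])).1 from by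
            simp [clear_area, hg.1, hg.2],
            A_loop x y d bound true Y hd1,
            single x y d bound ((y + d) - (y - d + 1)).toNat (y - d + 1) (y + d) Y rfl,
            show clear_area_alt (x, y) d Y bound true
              = (if |bound - y| < d then
                  dAppend Y bound (x - d + |bound - y|, x + d - |bound - y|) else Y) from by
            simp [clear_area_alt, hg.1, hg.2, show (0:Int) ≤ d by omega]]
        by_cases hoff : |bound - y| < d
        · have h' : y - d + 1 ≤ bound ∧ bound < y + d := by
            have := abs_lt.mp hoff; omega
          rw [if_pos h', if_pos hoff]
        · have h' : ¬(y - d + 1 ≤ bound ∧ bound < y + d) := by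
            rw [abs_lt] at hoff; omega
          rw [if_neg h', if_neg hoff]
      · rw [show clear_area (x, y) d Y bound true = Y from by
            simp [clear_area, hg.1, hg.2, PySem.List.pyRange_one_eq_nil (show d ≤ (0:Int) by omega)],
          show clear_area_alt (x, y) d Y bound true = Y from by
            simp [clear_area_alt, hg.1, hg.2, show (0:Int) ≤ d by omega,
              show ¬(|bound - y| < d) from by have := abs_nonneg (bound - y); omega]]
    · rw [show clear_area (x, y) d Y bound true = Y from by
            simp only [clear_area]
            rw [if_pos ⟨trivial, hg⟩],
          show clear_area_alt (x, y) d Y bound true = Y from by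
            simp only [clear_area_alt]
            rw [if_pos trivial, if_neg (fun hc => hg ⟨hc.2.1, hc.2.2⟩)]]
  | false =>
    by_cases hskip : y - d ≤ 0 ∧ y + d + 1 ≥ bound
    · rw [show clear_area (x, y) d Y bound false = Y from by
            simp [clear_area, hskip.1, hskip.2],
          show clear_area_alt (x, y) d Y bound false = Y from by
            simp [clear_area_alt, hskip.1, hskip.2]]
    · by_cases hd1 : 1 ≤ d
      · rw [A_p2 x y d bound Y hskip hd1, B_p2 x y d bound Y hskip]
        exact PySem.List.foldl_congr_mem _ _ _ _
          (fun acc cy hcy => by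
            rw [rowIv_agree x y d bound Y hskip hnD cy (PySem.List.mem_pyRange_one.mp hcy)])
      · rw [show clear_area (x, y) d Y bound false = Y from by
            simp [clear_area, hskip, PySem.List.pyRange_one_eq_nil (show d ≤ (0:Int) by omega)],
          show clear_area_alt (x, y) d Y bound false = Y from by
            simp [clear_area_alt, hskip,
              PySem.List.pyRange_one_eq_nil
                (show min bound (y + d - 1) + 1 ≤ max 0 (y - d + 1) by omega)]]

theorem clear_area_changed : Claim_changed_clear_area := by
  unfold Claim_changed_clear_area; decide

theorem clear_area_tight : Claim_exact_clear_area := by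
  intro sensor d Y bound p1 _hdom hpre hD heq
  obtain ⟨x, y⟩ := sensor
  unfold D_clear_area at hD
  dsimp only at hD
  obtain ⟨hp1, hskip, hd1, hb0, hy1, hyb, hs0, he0⟩ := hD
  subst hp1
  have hs : x - d + max 0 (max 0 (y - d + 1) - y) < 0 := by omega
  have he : x + d - max 0 (max 0 (y - d + 1) - y) > bound := by omega
  have hlh : max 0 (y - d + 1) ≤ min bound (y + d - 1) := by omega
  have hyh : y ≤ min bound (y + d - 1) := by omega
  rw [A_p2 x y d bound Y hskip hd1, B_p2 x y d bound Y hskip] at heq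
  have hkmem : (y + max 0 (max 0 (y - d + 1) - y))
      ∈ PySem.List.pyRange (max 0 (y - d + 1)) (min bound (y + d - 1) + 1) 1 :=
    PySem.List.mem_pyRange_one.mpr ⟨by omega, by omega⟩
  have hkeys := hpre.2 rfl hskip _ hkmem
  obtain ⟨v, hv⟩ := lookup_of_mem_keys Y _ hkeys
  have hcnt : (PySem.List.pyRange (max 0 (y - d + 1)) (min bound (y + d - 1) + 1) 1).count
      (y + max 0 (max 0 (y - d + 1) - y)) = 1 :=
    List.count_eq_one_of_mem (PySem.List.nodup_pyRange_one _ _) hkmem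
  have hA := lookup_foldl (rowIvA x y d bound) (y + max 0 (max 0 (y - d + 1) - y)) (PySem.List.pyRange (max 0 (y - d + 1)) (min bound (y + d - 1) + 1) 1) Y v hv
  have hB := lookup_foldl (rowIvB x y d bound) (y + max 0 (max 0 (y - d + 1) - y)) (PySem.List.pyRange (max 0 (y - d + 1)) (min bound (y + d - 1) + 1) 1) Y v hv
  rw [heq, hB, hcnt] at hA
  have hiv : rowIvB x y d bound (y + max 0 (max 0 (y - d + 1) - y))
      = rowIvA x y d bound (y + max 0 (max 0 (y - d + 1) - y)) := by
    have := List.append_cancel_left (Option.some.inj hA)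
    simpa using this
  have habs : |y + max 0 (max 0 (y - d + 1) - y) - y| = max 0 (max 0 (y - d + 1) - y) := by
    rw [abs_of_nonneg (by omega)]; ring
  simp only [rowIvA, rowIvB, habs] at hiv
  rw [if_pos (by omega), if_pos (by omega)] at hiv
  have h2 := congrArg Prod.snd hiv
  simp only [Prod.snd] at h2
  omega
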